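-- pv_equiv track=rewrite | github.com/Mr-Rajesh-108/problem_solving_DSA | Problem_of_Day/day_05/Find rectangle with corners as 1.py | has_rectangle_with_ones
-- ===== SOURCE A (Python) =====
-- def has_rectangle_with_ones(mat):
--     if not mat or not mat[0]:
--         return False
--
--     rows = len(mat)
--     cols = len(mat[0])
--     seen_pairs = set()
--
--     for i in range(rows):
--         ones = [j for j in range(cols) if mat[i][j] == 1]
--
--         # Check all pairs of 1s in the current row
--         for x in range(len(ones)):
--             for y in range(x + 1, len(ones)):
--                 pair = (ones[x], ones[y])
--                 if pair in seen_pairs: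
--                     return True
--                 seen_pairs.add(pair)
--
--     return False
-- ===== SOURCE B (Python) =====
-- def has_rectangle_with_ones(mat):
--     if not mat or not mat[0]:
--         return False
--
--     rows = len(mat)
--     cols = len(mat[0])
--
--     # Compare every pair of rows directly: a rectangle exists iff some two
--     # rows share at least two columns that are both 1.
--     for i in range(rows):
--         for k in range(i + 1, rows):
--             common = 0
--             for j in range(cols):
--                 if mat[i][j] == 1 and mat[k][j] == 1:
--                     common += 1
--                     if common == 2:
--                         return True
--     return False
-- ===== Notes on version B (the rewrite author's own statement) =====
-- stated objective: alternative
-- what changed: Replaces A's accumulated set of column-pair signatures (per-row enumeration of all pairs of 1-columns, checked against a growing set) with a direct pairwise row comparison that counts shared 1-columns and stops at two, using O(1) extra space instead of a set of up to O(cols^2) pairs.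
-- outside the precondition, e.g. on has_rectangle_with_ones([[1, 1], [1, 1], [1]]): A returns True, B returns True
import Mathlib
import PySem

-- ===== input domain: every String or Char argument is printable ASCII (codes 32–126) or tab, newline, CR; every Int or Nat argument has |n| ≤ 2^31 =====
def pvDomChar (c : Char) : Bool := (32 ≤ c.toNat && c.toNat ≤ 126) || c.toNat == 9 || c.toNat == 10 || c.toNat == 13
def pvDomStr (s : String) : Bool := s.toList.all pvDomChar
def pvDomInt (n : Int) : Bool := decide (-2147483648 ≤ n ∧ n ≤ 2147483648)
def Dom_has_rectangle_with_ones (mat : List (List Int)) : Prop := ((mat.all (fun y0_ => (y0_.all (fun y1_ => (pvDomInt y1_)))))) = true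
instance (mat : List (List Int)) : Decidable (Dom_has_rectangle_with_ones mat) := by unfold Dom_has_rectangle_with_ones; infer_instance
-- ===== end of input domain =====

-- B replaces A's growing set of column-pair signatures with a direct pairwise
-- row comparison counting shared 1-columns (alternative decomposition, O(1) extra space).

-- ===== PORT A =====
-- ones = [j for j in range(cols) if mat[i][j] == 1]
def pvOnes (row : List Int) (cols : Nat) : List Nat :=
  (List.range cols).filter (fun j => row.getD j 0 == 1)

-- the pairs (ones[x], ones[y]) for x < y, in A's enumeration order
def pvPairs : List Nat → List (Nat × Nat)
  | [] => []
  | a :: rest => rest.map (fun b => (a, b)) ++ pvPairs rest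

-- the inner double loop: 'return True' = none, otherwise the updated seen_pairs
def pvScanPairs (seen : PySem.Set (Nat × Nat)) : List (Nat × Nat) → Option (PySem.Set (Nat × Nat))
  | [] => some seen
  | p :: ps => if PySem.Set.contains seen p then none else pvScanPairs (PySem.Set.add seen p) ps

-- for i in range(rows): …
def pvRowsA (cols : Nat) (seen : PySem.Set (Nat × Nat)) : List (List Int) → Bool
  | [] => false
  | row :: rest =>
      match pvScanPairs seen (pvPairs (pvOnes row cols)) with
      | none => true
      | some seen' => pvRowsA cols seen' rest

def has_rectangle_with_ones (mat : List (List Int)) : Bool :=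
  match mat with
  | [] => false
  | row0 :: _ => if row0.isEmpty then false else pvRowsA row0.length PySem.Set.empty mat

-- ===== PORT B =====
-- innermost loop of Source B: count columns that are 1 in both rows, return True at 2
def pvCommon2 (r1 r2 : List Int) : List Nat → Nat → Bool
  | [], _ => false
  | j :: js, c =>
      if r1.getD j 0 == 1 && r2.getD j 0 == 1 then
        if c + 1 == 2 then true else pvCommon2 r1 r2 js (c + 1)
      else pvCommon2 r1 r2 js c

-- for k in range(i+1, rows): …
def pvInnerB (cols : Nat) (ri : List Int) : List (List Int) → Bool
  | [] => false
  | rk :: rest => pvCommon2 ri rk (List.range cols) 0 || pvInnerB cols ri rest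

-- for i in range(rows): …
def pvOuterB (cols : Nat) : List (List Int) → Bool
  | [] => false
  | r :: rest => pvInnerB cols r rest || pvOuterB cols rest

def has_rectangle_with_ones_alt (mat : List (List Int)) : Bool :=
  match mat with
  | [] => false
  | row0 :: _ => if row0.isEmpty then false else pvOuterB row0.length mat

-- ===== PRECONDITION & SPEC =====
-- Pre_ excludes ragged matrices (some row shorter than the first row): on those
-- the Python A raises IndexError unless a rectangle is found before the short
-- row is scanned, and B's scan order over such inputs is not A's.
def Pre_has_rectangle_with_ones (mat : List (List Int)) : Prop :=
  ∀ row ∈ mat, (mat.headD []).length ≤ row.length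
instance (mat : List (List Int)) : Decidable (Pre_has_rectangle_with_ones mat) := by
  unfold Pre_has_rectangle_with_ones; infer_instance

def pvWitness_has_rectangle_with_ones : List (List Int) := [[1, 1, 0], [0, 1, 1], [1, 1, 0]]

def Spec_has_rectangle_with_ones (mat : List (List Int)) (out : Bool) : Prop := out = has_rectangle_with_ones_alt mat
instance (mat : List (List Int)) (out : Bool) : Decidable (Spec_has_rectangle_with_ones mat out) := by unfold Spec_has_rectangle_with_ones; infer_instance

-- ===== CLAIM (what is proved, stated in full; the proofs are below) =====
def Claim_equal_has_rectangle_with_ones : Prop := ∀ (mat : List (List Int)), Dom_has_rectangle_with_ones mat → Pre_has_rectangle_with_ones mat → Spec_has_rectangle_with_ones mat (has_rectangle_with_ones mat)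

-- ===== LEMMAS AND PROOFS =====

-- two rows share (at least) two 1-columns below cols
def pvSharedP (cols : Nat) (r1 r2 : List Int) : Prop :=
  ∃ a b, a < b ∧ b < cols ∧ r1.getD a 0 = 1 ∧ r2.getD a 0 = 1 ∧ r1.getD b 0 = 1 ∧ r2.getD b 0 = 1

-- some row shares two 1-columns with a later row
def pvPairHit (cols : Nat) : List (List Int) → Prop
  | [] => False
  | r :: rest => (∃ r2 ∈ rest, pvSharedP cols r r2) ∨ pvPairHit cols rest

-- same, phrased through shared elements of pvPairs
def pvPairHitQ (cols : Nat) : List (List Int) → Prop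
  | [] => False
  | r :: rest => (∃ r2 ∈ rest, ∃ q, q ∈ pvPairs (pvOnes r cols) ∧ q ∈ pvPairs (pvOnes r2 cols)) ∨ pvPairHitQ cols rest

-- abstract state of A's row loop: P describes the current seen_pairs
def pvHitP (cols : Nat) (P : Nat × Nat → Prop) : List (List Int) → Prop
  | [] => False
  | r :: rest => (∃ q ∈ pvPairs (pvOnes r cols), P q) ∨ pvHitP cols (fun q => P q ∨ q ∈ pvPairs (pvOnes r cols)) rest

theorem pv_mem_ones {row : List Int} {cols j : Nat} :
    j ∈ pvOnes row cols ↔ j < cols ∧ row.getD j 0 = 1 := by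
  simp [pvOnes, List.mem_filter, List.mem_range]

theorem pv_ones_pairwise (row : List Int) (cols : Nat) :
    (pvOnes row cols).Pairwise (· < ·) := by
  exact (List.pairwise_lt_range).filter _

theorem pv_pairs_mem {l : List Nat} (h : l.Pairwise (· < ·)) {a b : Nat} :
    (a, b) ∈ pvPairs l ↔ a ∈ l ∧ b ∈ l ∧ a < b := by
  induction l with
  | nil => simp [pvPairs]
  | cons x rest ih =>
    rw [List.pairwise_cons] at h
    constructor
    · intro hm
      simp only [pvPairs, List.mem_append, List.mem_map] at hm
      rcases hm with ⟨b', hb', he⟩ | hm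
      · obtain ⟨rfl, rfl⟩ := Prod.mk.injEq .. ▸ he
        exact ⟨List.mem_cons_self, List.mem_cons_of_mem _ hb', h.1 _ hb'⟩
      · rcases (ih h.2).1 hm with ⟨ha, hb, hab⟩
        exact ⟨List.mem_cons_of_mem _ ha, List.mem_cons_of_mem _ hb, hab⟩
    · rintro ⟨ha, hb, hab⟩
      simp only [pvPairs, List.mem_append, List.mem_map]
      rcases List.mem_cons.1 ha with hax | ha
      · subst hax
        rcases List.mem_cons.1 hb with hbx | hb
        · exact absurd hab (hbx ▸ Nat.lt_irrefl a)
        · exact Or.inl ⟨b, hb, rfl⟩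
      · rcases List.mem_cons.1 hb with hbx | hb
        · exact absurd hab (by have := h.1 _ ha; omega)
        · exact Or.inr ((ih h.2).2 ⟨ha, hb, hab⟩)

theorem pv_pairs_nodup {l : List Nat} (h : l.Pairwise (· < ·)) : (pvPairs l).Nodup := by
  induction l with
  | nil => simp [pvPairs]
  | cons x rest ih =>
    rw [List.pairwise_cons] at h
    refine List.Nodup.append ?_ (ih h.2) ?_
    · exact (h.2.nodup).map (fun b1 b2 he => (Prod.mk.injEq .. ▸ he).2)
    · intro q hq1 hq2
      rcases q with ⟨a, b⟩
      rcases List.mem_map.1 hq1 with ⟨b', hb', he⟩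
      obtain ⟨rfl, rfl⟩ := Prod.mk.injEq .. ▸ he
      have := ((pv_pairs_mem h.2).1 hq2).1
      exact absurd (h.1 _ this) (by omega)

theorem pv_shared_iff_pairs {cols : Nat} {r1 r2 : List Int} :
    pvSharedP cols r1 r2 ↔ ∃ q, q ∈ pvPairs (pvOnes r1 cols) ∧ q ∈ pvPairs (pvOnes r2 cols) := by
  constructor
  · rintro ⟨a, b, hab, hb, h1a, h2a, h1b, h2b⟩
    refine ⟨(a, b), ?_, ?_⟩
    · exact (pv_pairs_mem (pv_ones_pairwise r1 cols)).2
        ⟨pv_mem_ones.2 ⟨by omega, h1a⟩, pv_mem_ones.2 ⟨hb, h1b⟩, hab⟩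
    · exact (pv_pairs_mem (pv_ones_pairwise r2 cols)).2
        ⟨pv_mem_ones.2 ⟨by omega, h2a⟩, pv_mem_ones.2 ⟨hb, h2b⟩, hab⟩
  · rintro ⟨⟨a, b⟩, hq1, hq2⟩
    have h1 := (pv_pairs_mem (pv_ones_pairwise r1 cols)).1 hq1
    have h2 := (pv_pairs_mem (pv_ones_pairwise r2 cols)).1 hq2
    rcases pv_mem_ones.1 h1.1 with ⟨_, e1a⟩
    rcases pv_mem_ones.1 h1.2.1 with ⟨hbc, e1b⟩
    rcases pv_mem_ones.1 h2.1 with ⟨_, e2a⟩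
    rcases pv_mem_ones.1 h2.2.1 with ⟨_, e2b⟩
    exact ⟨a, b, h1.2.2, hbc, e1a, e2a, e1b, e2b⟩

-- ---- A-side loop characterisation ----

theorem pv_scan_none {ps : List (Nat × Nat)} (h : ps.Nodup) :
    ∀ seen : PySem.Set (Nat × Nat), (pvScanPairs seen ps = none ↔ ∃ p ∈ ps, p ∈ seen) := by
  induction ps with
  | nil => intro seen; simp [pvScanPairs]
  | cons p ps ih =>
    intro seen
    rw [List.nodup_cons] at h
    by_cases hp : p ∈ seen
    · simp [pvScanPairs, hp]
    · have hc : PySem.Set.contains seen p = false := by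
        rcases Bool.eq_false_or_eq_true (PySem.Set.contains seen p) with h' | h'
        · exact absurd ((PySem.Set.contains_iff _ _).1 h') hp
        · exact h'
      simp only [pvScanPairs, hc, Bool.false_eq_true, if_false]
      rw [ih h.2 (PySem.Set.add seen p)]
      constructor
      · rintro ⟨q, hq, hmem⟩
        rcases (PySem.Set.mem_add _ _ _).1 hmem with hmem | rfl
        · exact ⟨q, List.mem_cons_of_mem _ hq, hmem⟩
        · exact absurd hq h.1
      · rintro ⟨q, hq, hmem⟩
        rcases List.mem_cons.1 hq with rfl | hq
        · exact absurd hmem hp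
        · exact ⟨q, hq, (PySem.Set.mem_add _ _ _).2 (Or.inl hmem)⟩

theorem pv_scan_some :
    ∀ (ps : List (Nat × Nat)) (seen seen' : PySem.Set (Nat × Nat)),
      pvScanPairs seen ps = some seen' → ∀ q, (q ∈ seen' ↔ q ∈ seen ∨ q ∈ ps) := by
  intro ps
  induction ps with
  | nil => intro seen seen' h q; simp [pvScanPairs] at h; simp [← h]
  | cons p ps ih =>
    intro seen seen' h q
    simp only [pvScanPairs] at h
    split at h
    · exact absurd h (by simp)
    · rename_i hc
      rw [ih _ _ h q, PySem.Set.mem_add _ _ _]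
      simp only [List.mem_cons]
      tauto

theorem pv_rowsA_iff (cols : Nat) :
    ∀ (rest : List (List Int)) (seen : PySem.Set (Nat × Nat)) (P : Nat × Nat → Prop),
      (∀ q, q ∈ seen ↔ P q) → (pvRowsA cols seen rest = true ↔ pvHitP cols P rest) := by
  intro rest
  induction rest with
  | nil => intro seen P _; simp [pvRowsA, pvHitP]
  | cons r rest ih =>
    intro seen P hinv
    have hnd := pv_pairs_nodup (pv_ones_pairwise r cols)
    simp only [pvRowsA, pvHitP]
    cases h : pvScanPairs seen (pvPairs (pvOnes r cols)) with
    | none =>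
      rcases (pv_scan_none hnd seen).1 h with ⟨p, hp, hmem⟩
      simp only [true_iff]
      exact Or.inl ⟨p, hp, (hinv p).1 hmem⟩
    | some seen' =>
      have hno : ¬ ∃ p ∈ pvPairs (pvOnes r cols), P p := by
        rintro ⟨p, hp, hP⟩
        have : pvScanPairs seen (pvPairs (pvOnes r cols)) = none :=
          (pv_scan_none hnd seen).2 ⟨p, hp, (hinv p).2 hP⟩
        rw [h] at this; exact absurd this (by simp)
      have hinv' : ∀ q, q ∈ seen' ↔ (P q ∨ q ∈ pvPairs (pvOnes r cols)) := by
        intro q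
        rw [pv_scan_some _ _ _ h q, hinv q]
      rw [ih seen' _ hinv']
      constructor
      · exact Or.inr
      · rintro (hx | hx)
        · exact absurd hx hno
        · exact hx

theorem pv_exists_mem_or {α : Type} {S : List α} {P R : α → Prop} :
    (∃ q ∈ S, (P q ∨ R q)) ↔ (∃ q ∈ S, P q) ∨ (∃ q ∈ S, R q) := by
  constructor
  · rintro ⟨q, hq, hP | hR⟩
    · exact Or.inl ⟨q, hq, hP⟩
    · exact Or.inr ⟨q, hq, hR⟩
  · rintro (⟨q, hq, hP⟩ | ⟨q, hq, hR⟩)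
    · exact ⟨q, hq, Or.inl hP⟩
    · exact ⟨q, hq, Or.inr hR⟩

theorem pv_hit_decomp (cols : Nat) :
    ∀ (rest : List (List Int)) (P : Nat × Nat → Prop),
      pvHitP cols P rest ↔ (∃ r ∈ rest, ∃ q ∈ pvPairs (pvOnes r cols), P q) ∨ pvPairHitQ cols rest := by
  intro rest
  induction rest with
  | nil => intro P; simp [pvHitP, pvPairHitQ]
  | cons r rest ih =>
    intro P
    simp only [pvHitP, pvPairHitQ, ih, List.exists_mem_cons_iff]
    constructor
    · rintro (h | h | h)
      · exact Or.inl (Or.inl h)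
      · rcases h with ⟨r2, hr2, hq⟩
        rcases pv_exists_mem_or.1 hq with hq | hq
        · exact Or.inl (Or.inr ⟨r2, hr2, hq⟩)
        · exact Or.inr (Or.inl ⟨r2, hr2, hq.imp (fun q hq => ⟨hq.2, hq.1⟩)⟩)
      · exact Or.inr (Or.inr h)
    · rintro ((h | ⟨r2, hr2, hq⟩) | (⟨r2, hr2, q, hq1, hq2⟩ | h))
      · exact Or.inl h
      · exact Or.inr (Or.inl ⟨r2, hr2, pv_exists_mem_or.2 (Or.inl hq)⟩)
      · exact Or.inr (Or.inl ⟨r2, hr2, pv_exists_mem_or.2 (Or.inr ⟨q, hq2, hq1⟩)⟩)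
      · exact Or.inr (Or.inr h)

theorem pv_pairHitQ_iff (cols : Nat) :
    ∀ (l : List (List Int)), pvPairHitQ cols l ↔ pvPairHit cols l := by
  intro l
  induction l with
  | nil => simp [pvPairHitQ, pvPairHit]
  | cons r rest ih =>
    simp only [pvPairHitQ, pvPairHit, ih]
    constructor
    · rintro (⟨r2, hr2, q, h1, h2⟩ | h)
      · exact Or.inl ⟨r2, hr2, pv_shared_iff_pairs.2 ⟨q, h1, h2⟩⟩
      · exact Or.inr h
    · rintro (⟨r2, hr2, hs⟩ | h)
      · rcases pv_shared_iff_pairs.1 hs with ⟨q, h1, h2⟩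
        exact Or.inl ⟨r2, hr2, q, h1, h2⟩
      · exact Or.inr h

theorem pv_A_iff (cols : Nat) (mat : List (List Int)) :
    pvRowsA cols PySem.Set.empty mat = true ↔ pvPairHit cols mat := by
  rw [pv_rowsA_iff cols mat PySem.Set.empty (fun _ => False) (by simp [PySem.Set.empty]),
      pv_hit_decomp, pv_pairHitQ_iff]
  simp

-- ---- B-side loop characterisation ----

theorem pv_common2_count (r1 r2 : List Int) :
    ∀ (js : List Nat) (c : Nat), c < 2 →
      (pvCommon2 r1 r2 js c = true ↔
        2 ≤ c + (js.filter (fun j => r1.getD j 0 == 1 && r2.getD j 0 == 1)).length) := by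
  intro js
  induction js with
  | nil => intro c hc; simp [pvCommon2]; omega
  | cons j js ih =>
    intro c hc
    rw [List.filter_cons]
    by_cases hp : (r1.getD j 0 == 1 && r2.getD j 0 == 1) = true
    · rw [if_pos hp]
      by_cases hc1 : c + 1 = 2
      · have h2 : (c + 1 == 2) = true := by simp [hc1]
        simp only [pvCommon2, hp, if_true, h2, List.length_cons]
        constructor
        · intro _; omega
        · intro _; trivial
      · have h2 : (c + 1 == 2) = false := by simp; omega
        simp only [pvCommon2, hp, if_true, h2, Bool.false_eq_true, if_false, List.length_cons]
        rw [ih (c + 1) (by omega)]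
        omega
    · have hp' : (r1.getD j 0 == 1 && r2.getD j 0 == 1) = false := by
        rcases Bool.eq_false_or_eq_true (r1.getD j 0 == 1 && r2.getD j 0 == 1) with h' | h'
        · exact absurd h' hp
        · exact h'
      simp only [pvCommon2, hp', Bool.false_eq_true, if_false]
      exact ih c hc

theorem pv_two_le_pairwise {l : List Nat} (h : l.Pairwise (· < ·)) :
    2 ≤ l.length ↔ ∃ a b, a < b ∧ a ∈ l ∧ b ∈ l := by
  constructor
  · intro hl
    match l, h with
    | a :: b :: rest, h =>
      rw [List.pairwise_cons] at h
      exact ⟨a, b, h.1 _ (by simp), by simp, by simp⟩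
  · rintro ⟨a, b, hab, ha, hb⟩
    match l with
    | [] => simp at ha
    | [x] =>
      simp only [List.mem_singleton] at ha hb
      omega
    | _ :: _ :: _ => simp [List.length_cons]

theorem pv_common2_iff (cols : Nat) (r1 r2 : List Int) :
    pvCommon2 r1 r2 (List.range cols) 0 = true ↔ pvSharedP cols r1 r2 := by
  rw [pv_common2_count r1 r2 _ 0 (by omega)]
  have hpw : (List.filter (fun j => r1.getD j 0 == 1 && r2.getD j 0 == 1) (List.range cols)).Pairwise (· < ·) :=
    (List.pairwise_lt_range).filter _
  rw [Nat.zero_add, pv_two_le_pairwise hpw]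
  unfold pvSharedP
  constructor
  · rintro ⟨a, b, hab, ha, hb⟩
    rw [List.mem_filter, List.mem_range] at ha hb
    have ha2 := ha.2
    have hb2 := hb.2
    rw [Bool.and_eq_true, beq_iff_eq, beq_iff_eq] at ha2 hb2
    exact ⟨a, b, hab, hb.1, ha2.1, ha2.2, hb2.1, hb2.2⟩
  · rintro ⟨a, b, hab, hb, e1a, e2a, e1b, e2b⟩
    refine ⟨a, b, hab, ?_, ?_⟩ <;>
      rw [List.mem_filter, List.mem_range, Bool.and_eq_true, beq_iff_eq, beq_iff_eq]
    · exact ⟨by omega, e1a, e2a⟩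
    · exact ⟨hb, e1b, e2b⟩

theorem pv_innerB_iff (cols : Nat) (ri : List Int) :
    ∀ rest : List (List Int), (pvInnerB cols ri rest = true ↔ ∃ r2 ∈ rest, pvSharedP cols ri r2) := by
  intro rest
  induction rest with
  | nil => simp [pvInnerB]
  | cons rk rest ih =>
    simp only [pvInnerB, Bool.or_eq_true, ih, pv_common2_iff, List.exists_mem_cons_iff]

theorem pv_B_iff (cols : Nat) :
    ∀ mat : List (List Int), (pvOuterB cols mat = true ↔ pvPairHit cols mat) := by
  intro mat
  induction mat with
  | nil => simp [pvOuterB, pvPairHit]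
  | cons r rest ih =>
    simp only [pvOuterB, Bool.or_eq_true, ih, pv_innerB_iff, pvPairHit]

-- ===== VERDICT (by name: the statement is the Claim_ definition above) =====
theorem has_rectangle_with_ones_spec : Claim_equal_has_rectangle_with_ones := by
  intro mat _ _
  unfold Spec_has_rectangle_with_ones
  unfold has_rectangle_with_ones has_rectangle_with_ones_alt
  match mat with
  | [] => rfl
  | row0 :: rest =>
    by_cases h : row0.isEmpty
    · simp [h]
    · simp only [h, Bool.false_eq_true, if_false]
      rw [Bool.eq_iff_iff, pv_A_iff, pv_B_iff]
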